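-- pv_equiv track=rewrite | github.com/taiwolfB/GoogleGrupa5 | Homework/Individual/TemaW3.py | recursive_sums
-- ===== SOURCE A (Python) =====
-- def recursive_sums(number,returnVals):
--     if number != 0:
--         if number % 2 == 0:
--              return recursive_sums(number-1,[returnVals[0] + number, returnVals[1] + number, returnVals[2]])
--         else:
--              return recursive_sums(number-1,[returnVals[0] + number, returnVals[1], returnVals[2] + number])
--     else:
--         return returnVals
-- ===== SOURCE B (Python) =====
-- def recursive_sums(number, returnVals):
--     if number == 0:
--         return returnVals
--     total = number * (number + 1) // 2
--     half = number // 2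
--     evens = half * (half + 1)
--     return [returnVals[0] + total, returnVals[1] + evens, returnVals[2] + (total - evens)]
-- ===== Notes on version B (the rewrite author's own statement) =====
-- stated objective: simpler
-- what changed: Replaced the recursion that accumulates each integer 1..n one call at a time with closed-form arithmetic-series formulas (n(n+1)/2 for the total, k(k+1) with k=n//2 for the evens, their difference for the odds).
-- outside the precondition, e.g. on recursive_sums(950, [0, 0, 0]): A returns [451725, 226100, 225625], B returns [451725, 226100, 225625]
import Mathlib
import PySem

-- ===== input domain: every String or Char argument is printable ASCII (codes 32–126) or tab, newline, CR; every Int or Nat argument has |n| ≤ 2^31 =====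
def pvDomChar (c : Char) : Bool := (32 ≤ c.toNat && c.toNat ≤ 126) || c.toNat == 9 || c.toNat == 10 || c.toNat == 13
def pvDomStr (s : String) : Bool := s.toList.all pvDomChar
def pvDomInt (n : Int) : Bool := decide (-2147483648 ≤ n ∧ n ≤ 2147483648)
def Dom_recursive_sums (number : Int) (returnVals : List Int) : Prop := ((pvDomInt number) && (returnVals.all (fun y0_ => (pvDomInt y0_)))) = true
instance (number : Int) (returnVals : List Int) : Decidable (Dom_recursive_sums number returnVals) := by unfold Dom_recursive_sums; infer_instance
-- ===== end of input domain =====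

-- B replaces A's per-integer recursion by closed-form arithmetic-series formulas (simpler).


-- ===== PORT A =====
-- A recurses with number-1 until number = 0; ported as structural recursion on number.toNat
-- (exact for number ≥ 0, which Pre_ guarantees; for number < 0 Python never terminates normally).
def recursive_sums_go : Nat → List Int → List Int
  | 0, rv => rv
  | k + 1, rv =>
      let n : Int := ((k : Int) + 1)
      if PySem.Int.mod n 2 = 0 then
        recursive_sums_go k [PySem.List.pyGetD rv 0 0 + n, PySem.List.pyGetD rv 1 0 + n, PySem.List.pyGetD rv 2 0]
      else
        recursive_sums_go k [PySem.List.pyGetD rv 0 0 + n, PySem.List.pyGetD rv 1 0, PySem.List.pyGetD rv 2 0 + n]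

def recursive_sums (number : Int) (returnVals : List Int) : List Int :=
  recursive_sums_go number.toNat returnVals

-- ===== PORT B =====
def recursive_sums_alt (number : Int) (returnVals : List Int) : List Int :=
  if number = 0 then returnVals
  else
    let total := PySem.Int.floordiv (number * (number + 1)) 2
    let half := PySem.Int.floordiv number 2
    let evens := half * (half + 1)
    [PySem.List.pyGetD returnVals 0 0 + total,
     PySem.List.pyGetD returnVals 1 0 + evens,
     PySem.List.pyGetD returnVals 2 0 + (total - evens)]

-- ===== PRECONDITION & SPEC =====
-- A raises on excluded inputs: for number < 0 and for number beyond Python's recursion limit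
-- (default limit 1000 frames; 900 is kept as a safety margin) the recursion never reaches 0 /
-- overflows the stack (RecursionError), and for number ≠ 0 with fewer than 3 elements it raises IndexError.
def Pre_recursive_sums (number : Int) (returnVals : List Int) : Prop :=
  0 ≤ number ∧ number ≤ 900 ∧ (number = 0 ∨ 3 ≤ returnVals.length)
instance (number : Int) (returnVals : List Int) : Decidable (Pre_recursive_sums number returnVals) := by unfold Pre_recursive_sums; infer_instance
def pvWitness_recursive_sums : Int × List Int := (5, [0, 0, 0])

def Spec_recursive_sums (number : Int) (returnVals : List Int) (out : List Int) : Prop := out = recursive_sums_alt number returnVals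
instance (number : Int) (returnVals : List Int) (out : List Int) : Decidable (Spec_recursive_sums number returnVals out) := by unfold Spec_recursive_sums; infer_instance

-- ===== CLAIM (what is proved, stated in full; the proofs are below) =====
def Claim_equal_recursive_sums : Prop := ∀ (number : Int) (returnVals : List Int), Dom_recursive_sums number returnVals → Pre_recursive_sums number returnVals → Spec_recursive_sums number returnVals (recursive_sums number returnVals)

-- ===== LEMMAS AND PROOFS =====

-- running sums of 1..k (all / even / odd terms), mirroring A's accumulation order
def sT : Nat → Int
  | 0 => 0
  | k + 1 => sT k + ((k : Int) + 1)

def sE : Nat → Int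
  | 0 => 0
  | k + 1 => if PySem.Int.mod ((k : Int) + 1) 2 = 0 then sE k + ((k : Int) + 1) else sE k

def sO : Nat → Int
  | 0 => 0
  | k + 1 => if PySem.Int.mod ((k : Int) + 1) 2 = 0 then sO k else sO k + ((k : Int) + 1)

theorem pyGetD3 (a b c : Int) (rest : List Int) :
    PySem.List.pyGetD (a :: b :: c :: rest) 0 0 = a ∧
    PySem.List.pyGetD (a :: b :: c :: rest) 1 0 = b ∧
    PySem.List.pyGetD (a :: b :: c :: rest) 2 0 = c := by
  refine ⟨?_, ?_, ?_⟩
  · rw [PySem.List.pyGetD_ofNat' (a :: b :: c :: rest) 0 0]; rfl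
  · rw [PySem.List.pyGetD_ofNat' (a :: b :: c :: rest) 1 0]; rfl
  · rw [PySem.List.pyGetD_ofNat' (a :: b :: c :: rest) 2 0]; rfl

theorem go_triple (k : Nat) : ∀ a b c : Int,
    recursive_sums_go k [a, b, c] = [a + sT k, b + sE k, c + sO k] := by
  induction k with
  | zero => intro a b c; simp [recursive_sums_go, sT, sE, sO]
  | succ k ih =>
      intro a b c
      obtain ⟨g0, g1, g2⟩ := pyGetD3 a b c []
      simp only [recursive_sums_go, sT, sE, sO]
      split_ifs with h <;> rw [g0, g1, g2, ih] <;>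
        simp only [List.cons.injEq] <;> and_intros <;> first | trivial | ring

theorem go_run (j : Nat) (a b c : Int) (rest : List Int) :
    recursive_sums_go (j + 1) (a :: b :: c :: rest) =
      [a + sT (j + 1), b + sE (j + 1), c + sO (j + 1)] := by
  obtain ⟨g0, g1, g2⟩ := pyGetD3 a b c rest
  simp only [recursive_sums_go, sT, sE, sO]
  split_ifs with h <;> rw [g0, g1, g2, go_triple] <;>
    simp only [List.cons.injEq] <;> and_intros <;> first | trivial | ring

theorem mod_two_cast (k : Nat) :
    PySem.Int.mod ((k : Int)) 2 = 0 ↔ k % 2 = 0 := by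
  rw [PySem.Int.mod_eq_emod_of_pos (by norm_num)]
  omega

theorem sT_two_mul (k : Nat) : 2 * sT k = (k : Int) * ((k : Int) + 1) := by
  induction k with
  | zero => simp [sT]
  | succ k ih => simp only [sT]; push_cast; linarith

theorem sE_closed (k : Nat) : sE k = ((k / 2 : Nat) : Int) * (((k / 2 : Nat) : Int) + 1) := by
  induction k with
  | zero => simp [sE]
  | succ k ih =>
      simp only [sE]
      by_cases h : (k + 1) % 2 = 0
      · rw [if_pos (by rw [show ((k : Int) + 1) = ((k + 1 : Nat) : Int) by push_cast; ring, mod_two_cast]; exact h), ih]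
        have h1 : (k + 1) / 2 = k / 2 + 1 := by omega
        have h2 : (k : Int) + 1 = 2 * ((k / 2 : Nat) : Int) + 2 := by omega
        have h3 : ((k / 2 + 1 : Nat) : Int) = ((k / 2 : Nat) : Int) + 1 := by exact_mod_cast rfl
        rw [h1, h3, h2]; ring
      · rw [if_neg (by rw [show ((k : Int) + 1) = ((k + 1 : Nat) : Int) by push_cast; ring, mod_two_cast]; exact h), ih]
        have h1 : (k + 1) / 2 = k / 2 := by omega
        rw [h1]

theorem sO_closed (k : Nat) : sO k = sT k - sE k := by
  induction k with
  | zero => simp [sO, sT, sE]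
  | succ k ih => simp only [sO, sT, sE]; split_ifs <;> rw [ih] <;> ring

theorem sT_closed (k : Nat) : sT k = PySem.Int.floordiv ((k : Int) * ((k : Int) + 1)) 2 := by
  rw [show (k : Int) * ((k : Int) + 1) = 2 * sT k from (sT_two_mul k).symm,
      PySem.Int.floordiv_eq_ediv_of_pos (by norm_num), Int.mul_ediv_cancel_left _ (by norm_num)]

-- ===== VERDICT (by name: the statement is the Claim_ definition above) =====
theorem recursive_sums_spec : Claim_equal_recursive_sums := by
  intro number rv _ hpre
  obtain ⟨h0, _, hcase⟩ := hpre
  unfold Spec_recursive_sums recursive_sums recursive_sums_alt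
  by_cases hz : number = 0
  · subst hz; simp [recursive_sums_go]
  · have hlen : 3 ≤ rv.length := hcase.resolve_left hz
    obtain ⟨a, b, c, rest, rfl⟩ : ∃ a b c rest, rv = a :: b :: c :: rest := by
      match rv, hlen with
      | x :: y :: z :: r, _ => exact ⟨x, y, z, r, rfl⟩
    have hm : ∃ j : Nat, number.toNat = j + 1 ∧ number = ((j : Int) + 1) := by
      refine ⟨number.toNat - 1, by omega, by omega⟩
    obtain ⟨j, hj, hnum⟩ := hm
    obtain ⟨g0, g1, g2⟩ := pyGetD3 a b c rest
    rw [hj, go_run, if_neg hz, hnum, g0, g1, g2]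
    have hhalf : PySem.Int.floordiv ((j : Int) + 1) 2 = (((j + 1) / 2 : Nat) : Int) := by
      rw [show ((j : Int) + 1) = ((j + 1 : Nat) : Int) by push_cast; ring]
      exact_mod_cast PySem.Int.floordiv_natCast (j + 1) 2
    simp only [hhalf,
      show ((j : Int) + 1) * (((j : Int) + 1) + 1) = (((j + 1 : Nat) : Int)) * (((j + 1 : Nat) : Int) + 1) by push_cast; ring,
      ← sT_closed, ← sE_closed, sO_closed]
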